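-- pv_equiv track=rewrite | github.com/Fuzzyslippers412/Mycasapro | mycasa-pro/api/routes/bank.py | suggest_column_mappings
-- ===== SOURCE A (Python) =====
-- from typing import Dict, Any, List, Optional
--
-- def suggest_column_mappings(columns: List[str]) -> Dict[str, str]:
--     """
--     Suggest column mappings based on common naming patterns.
--
--     Args:
--         columns: List of column names from CSV
--
--     Returns:
--         Suggested mapping of standard fields to column names
--     """
--     suggestions = {}
--
--     # Convert columns to lowercase for comparison
--     col_lower = [col.lower() for col in columns]
--
--     # Look for date columns
--     date_patterns = ['date', 'dt', 'time', 'posted', 'transaction']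
--     for pattern in date_patterns:
--         for i, col in enumerate(col_lower):
--             if pattern in col and ('date' in col or 'time' in col or 'dt' in col):
--                 suggestions['date'] = columns[i]
--                 break
--         if 'date' in suggestions:
--             break
--
--     # Look for amount columns
--     amount_patterns = ['amount', 'amt', 'value', 'price', 'balance', 'change']
--     for pattern in amount_patterns:
--         for i, col in enumerate(col_lower):
--             if pattern in col and 'amount' in col:
--                 suggestions['amount'] = columns[i]
--                 break
--         if 'amount' in suggestions:
--             break
--
--     # Look for description columns
--     desc_patterns = ['description', 'desc', 'memo', 'notes', 'payee', 'details']
--     for pattern in desc_patterns: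
--         for i, col in enumerate(col_lower):
--             if pattern in col:
--                 suggestions['description'] = columns[i]
--                 break
--         if 'description' in suggestions:
--             break
--
--     # Look for merchant/columns
--     merchant_patterns = ['merchant', 'vendor', 'payee', 'store', 'company']
--     for pattern in merchant_patterns:
--         for i, col in enumerate(col_lower):
--             if pattern in col:
--                 suggestions['merchant'] = columns[i]
--                 break
--         if 'merchant' in suggestions:
--             break
--
--     return suggestions
-- ===== SOURCE B (Python) =====
-- def suggest_column_mappings(columns):
--     """Data-driven re-implementation: one uniform argmin-style selection per field
--     instead of four copies of nested break loops."""
--     cols = [c.lower() for c in columns]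
--     fields = [
--         ("date", ['date', 'dt', 'time', 'posted', 'transaction'],
--          lambda c: 'date' in c or 'time' in c or 'dt' in c),
--         ("amount", ['amount', 'amt', 'value', 'price', 'balance', 'change'],
--          lambda c: 'amount' in c),
--         ("description", ['description', 'desc', 'memo', 'notes', 'payee', 'details'],
--          lambda c: True),
--         ("merchant", ['merchant', 'vendor', 'payee', 'store', 'company'],
--          lambda c: True),
--     ]
--     suggestions = {}
--     for field, patterns, pred in fields:
--         hits = [(rank, idx)
--                 for rank, pat in enumerate(patterns)
--                 for idx, col in enumerate(cols)
--                 if pat in col and pred(col)]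
--         if hits:
--             suggestions[field] = columns[min(hits)[1]]
--     return suggestions
-- ===== Notes on version B (the rewrite author's own statement) =====
-- stated objective: simpler
-- what changed: Replaces the four copy-pasted pattern-outer/column-inner break loops with a single data-driven loop over (field, patterns, predicate) triples that picks, via min over (pattern-rank, column-index) candidate pairs, the best match per field.
import Mathlib
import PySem

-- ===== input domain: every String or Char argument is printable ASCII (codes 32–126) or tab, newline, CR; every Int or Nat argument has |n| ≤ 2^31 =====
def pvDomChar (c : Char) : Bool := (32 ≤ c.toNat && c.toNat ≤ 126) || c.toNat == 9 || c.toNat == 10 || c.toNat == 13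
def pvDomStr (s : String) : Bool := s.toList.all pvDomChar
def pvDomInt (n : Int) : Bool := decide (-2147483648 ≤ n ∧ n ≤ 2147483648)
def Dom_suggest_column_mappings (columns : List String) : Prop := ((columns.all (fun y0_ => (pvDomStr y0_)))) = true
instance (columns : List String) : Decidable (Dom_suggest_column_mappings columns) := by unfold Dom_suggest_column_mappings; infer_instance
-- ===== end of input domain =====

-- B replaces A's four copy-pasted pattern-outer/column-inner break loops by one data-driven
-- loop that selects, per field, the min over (pattern-rank, column-index) candidate pairs
-- (objective: simpler).

-- ===== PORT A =====
-- inner 'for i, col in enumerate(col_lower): if pattern in col and <pred>(col): suggestions[f] = columns[i]; break'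
-- (walks columns and col_lower in parallel: the i of enumerate is only used to index columns)
def aInner : List String → List String → String → (String → Bool) → Option String
  | o :: os, c :: cs, p, pred =>
      if PySem.Str.isIn p c && pred c then some o else aInner os cs p pred
  | _, _, _, _ => none

-- outer 'for pattern in patterns: …; if f in suggestions: break'
def aField (columns cols : List String) (pred : String → Bool) : List String → Option String
  | [] => none
  | p :: ps =>
      match aInner columns cols p pred with
      | some v => some v
      | none => aField columns cols pred ps

def suggest_column_mappings (columns : List String) : List (String × String) :=
  let col_lower := columns.map PySem.Str.lower
  let d0 : PySem.Dict String String := PySem.Dict.empty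
  let d1 := match aField columns col_lower
      (fun c => PySem.Str.isIn "date" c || PySem.Str.isIn "time" c || PySem.Str.isIn "dt" c)
      ["date", "dt", "time", "posted", "transaction"] with
    | some v => PySem.Dict.insert d0 "date" v
    | none => d0
  let d2 := match aField columns col_lower (fun c => PySem.Str.isIn "amount" c)
      ["amount", "amt", "value", "price", "balance", "change"] with
    | some v => PySem.Dict.insert d1 "amount" v
    | none => d1
  let d3 := match aField columns col_lower (fun _ => true)
      ["description", "desc", "memo", "notes", "payee", "details"] with
    | some v => PySem.Dict.insert d2 "description" v
    | none => d2
  let d4 := match aField columns col_lower (fun _ => true)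
      ["merchant", "vendor", "payee", "store", "company"] with
    | some v => PySem.Dict.insert d3 "merchant" v
    | none => d3
  PySem.Dict.items d4

-- ===== PORT B =====
-- the comprehension 'hits = [(rank, idx) for rank, pat in enumerate(patterns) for idx, col in enumerate(cols) if pat in col and pred(col)]'
def bHits (cols : List String) (patterns : List String) (pred : String → Bool) : List (Int × Int) :=
  (PySem.List.enumerate patterns).flatMap (fun rp =>
    (PySem.List.enumerate cols).filterMap (fun ic =>
      if PySem.Str.isIn rp.2 ic.2 && pred ic.2 then some (rp.1, ic.1) else none))

-- 'if hits: suggestions[field] = columns[min(hits)[1]]'  (pyGet? is total; the index comes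
-- from enumerate so it is always in range, exactly as in the Python)
def bField (columns cols : List String) (patterns : List String) (pred : String → Bool) : Option String :=
  match PySem.List.min2? (bHits cols patterns pred) Prod.fst Prod.snd with
  | some ri => PySem.List.pyGet? columns ri.2
  | none => none

def bFields : List (String × List String × (String → Bool)) :=
  [("date", ["date", "dt", "time", "posted", "transaction"],
     fun c => PySem.Str.isIn "date" c || PySem.Str.isIn "time" c || PySem.Str.isIn "dt" c),
   ("amount", ["amount", "amt", "value", "price", "balance", "change"],
     fun c => PySem.Str.isIn "amount" c),
   ("description", ["description", "desc", "memo", "notes", "payee", "details"], fun _ => true),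
   ("merchant", ["merchant", "vendor", "payee", "store", "company"], fun _ => true)]

def suggest_column_mappings_alt (columns : List String) : List (String × String) :=
  let cols := columns.map PySem.Str.lower
  PySem.Dict.items (bFields.foldl (fun d f =>
    match bField columns cols f.2.1 f.2.2 with
    | some v => PySem.Dict.insert d f.1 v
    | none => d) PySem.Dict.empty)

-- ===== PRECONDITION & SPEC =====
def Spec_suggest_column_mappings (columns : List String) (out : List (String × String)) : Prop := out = suggest_column_mappings_alt columns
instance (columns : List String) (out : List (String × String)) : Decidable (Spec_suggest_column_mappings columns out) := by unfold Spec_suggest_column_mappings; infer_instance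

-- ===== CLAIM (what is proved, stated in full; the proofs are below) =====
def Claim_equal_suggest_column_mappings : Prop := ∀ (columns : List String), Dom_suggest_column_mappings columns → Spec_suggest_column_mappings columns (suggest_column_mappings columns)

-- ===== LEMMAS AND PROOFS =====

def lexR (a b : Int × Int) : Prop := a.1 < b.1 ∨ (a.1 = b.1 ∧ a.2 < b.2)

theorem min2_keep (t : List (Int × Int)) : ∀ (b : Int × Int), (∀ x ∈ t, ¬ lexR x b) →
    PySem.List.min2? (b :: t) Prod.fst Prod.snd = some b := by
  induction t with
  | nil => intro b _; rfl
  | cons a t ih =>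
      intro b h
      have ha := h a (by simp)
      simp only [lexR, not_or, not_and] at ha
      have hcond' : ¬ (a.1 < b.1 ∨ a.1 ≤ b.1 ∧ a.2 < b.2) := by
        rcases ha with ⟨h1, h2⟩
        by_cases he : a.1 = b.1
        · have := h2 he; omega
        · omega
      have step : PySem.List.min2? (b :: a :: t) Prod.fst Prod.snd
          = PySem.List.min2? (b :: t) Prod.fst Prod.snd := by
        simp [PySem.List.min2?, List.foldl_cons, hcond']
      rw [step]
      exact ih b (fun x hx => h x (by simp [hx]))

theorem min2_sorted (l : List (Int × Int)) (h : l.Pairwise lexR) :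
    PySem.List.min2? l Prod.fst Prod.snd = l.head? := by
  cases l with
  | nil => rfl
  | cons a t =>
      have hall : ∀ x ∈ t, ¬ lexR x a := by
        intro x hx
        have := (List.pairwise_cons.mp h).1 x hx
        simp only [lexR] at this ⊢
        omega
      simp [min2_keep t a hall]

theorem chunk_head (cond : String → Bool) (s : Int) :
    ∀ (cols : List String) (t : Int),
      ((PySem.List.enumerate cols t).filterMap
          (fun ic => if cond ic.2 then some (s, ic.1) else none)).head?
        = (cols.findIdx? cond).map (fun i => (s, t + (i : Int))) := by
  intro cols
  induction cols with
  | nil => intro t; rfl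
  | cons c cs ih =>
      intro t
      rw [PySem.List.enumerate_cons, List.filterMap_cons, List.findIdx?_cons]
      by_cases hc : cond c
      · simp [hc]
      · simp only [hc, Bool.false_eq_true, ite_false, ih (t + 1)]
        cases h : cs.findIdx? cond with
        | none => simp
        | some i => simp; ring

theorem chunk_mem (cond : String → Bool) (s : Int) (cols : List String) (t : Int)
    (x : Int × Int)
    (hx : x ∈ (PySem.List.enumerate cols t).filterMap
        (fun ic => if cond ic.2 then some (s, ic.1) else none)) :
    x.1 = s ∧ t ≤ x.2 := by
  rcases List.mem_filterMap.mp hx with ⟨a, ha, hfa⟩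
  rcases (PySem.List.mem_enumerate_iff cols t a).mp ha with ⟨k, hk, rfl⟩
  by_cases hc : cond (cols[k])
  · simp [hc] at hfa
    rw [← hfa]
    exact ⟨rfl, by simp⟩
  · simp [hc] at hfa

theorem chunk_pairwise (cond : String → Bool) (s : Int) (cols : List String) (t : Int) :
    ((PySem.List.enumerate cols t).filterMap
        (fun ic => if cond ic.2 then some (s, ic.1) else none)).Pairwise lexR := by
  rw [List.pairwise_filterMap]
  apply List.Pairwise.imp ?_ (PySem.List.pairwise_lt_enumerate cols t)
  intro a a' hlt b hb b' hb'
  by_cases hc : cond a.2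
  · by_cases hc' : cond a'.2
    · simp [hc] at hb; simp [hc'] at hb'
      subst hb; subst hb'
      exact Or.inr ⟨rfl, hlt⟩
    · simp [hc'] at hb'
  · simp [hc] at hb

theorem hits_shape (cols : List String) (pred : String → Bool) :
    ∀ (ps : List String) (s : Int),
      ((PySem.List.enumerate ps s).flatMap (fun rp =>
          (PySem.List.enumerate cols).filterMap (fun ic =>
            if PySem.Str.isIn rp.2 ic.2 && pred ic.2 then some (rp.1, ic.1) else none))).Pairwise lexR
      ∧ ∀ x ∈ (PySem.List.enumerate ps s).flatMap (fun rp =>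
          (PySem.List.enumerate cols).filterMap (fun ic =>
            if PySem.Str.isIn rp.2 ic.2 && pred ic.2 then some (rp.1, ic.1) else none)), s ≤ x.1 := by
  intro ps
  induction ps with
  | nil => intro s; exact ⟨List.Pairwise.nil, by simp [PySem.List.enumerate]⟩
  | cons p ps ih =>
      intro s
      rw [PySem.List.enumerate_cons, List.flatMap_cons]
      rcases ih (s + 1) with ⟨ihp, ihm⟩
      have hchunk_mem := fun x hx => chunk_mem (fun c => PySem.Str.isIn p c && pred c) s cols 0 x hx
      constructor
      · rw [List.pairwise_append]
        refine ⟨chunk_pairwise (fun c => PySem.Str.isIn p c && pred c) s cols 0, ihp, ?_⟩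
        intro a haa b hbb
        have h1 := (hchunk_mem a haa).1
        have h2 := ihm b hbb
        exact Or.inl (by omega)
      · intro x hx
        rcases List.mem_append.mp hx with h | h
        · have := (hchunk_mem x h).1; omega
        · have := ihm x h; omega

theorem aInner_eq (p : String) (pred : String → Bool) :
    ∀ (cols columns : List String), columns.length = cols.length →
      aInner columns cols p pred
        = (cols.findIdx? (fun c => PySem.Str.isIn p c && pred c)).bind (fun i => columns[i]?) := by
  intro cols
  induction cols with
  | nil =>
      intro columns hlen
      have : columns = [] := List.length_eq_zero_iff.mp hlen
      subst this; rfl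
  | cons c cs ih =>
      intro columns hlen
      cases columns with
      | nil => simp at hlen
      | cons o os =>
          rw [List.findIdx?_cons]
          by_cases hc : (PySem.Str.isIn p c && pred c) = true
          · simp only [aInner, hc, ite_true]
            simp
          · simp only [aInner, hc, Bool.false_eq_true, ite_false]
            rw [ih os (by simpa using hlen)]
            cases h : cs.findIdx? (fun c => PySem.Str.isIn p c && pred c) <;> simp

theorem aField_eq_head (columns cols : List String) (hlen : columns.length = cols.length)
    (pred : String → Bool) :
    ∀ (ps : List String) (s : Int),
      aField columns cols pred ps
        = ((PySem.List.enumerate ps s).flatMap (fun rp =>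
            (PySem.List.enumerate cols).filterMap (fun ic =>
              if PySem.Str.isIn rp.2 ic.2 && pred ic.2 then some (rp.1, ic.1) else none))).head?.bind
            (fun ri => PySem.List.pyGet? columns ri.2) := by
  intro ps
  induction ps with
  | nil => intro s; rfl
  | cons p ps ih =>
      intro s
      simp only [PySem.List.enumerate_cons, List.flatMap_cons]
      have hch : ((PySem.List.enumerate cols).filterMap
          (fun ic => if PySem.Str.isIn p ic.2 && pred ic.2 then some (s, ic.1) else none)).head?
          = (cols.findIdx? (fun c => PySem.Str.isIn p c && pred c)).map
              (fun i => (s, (0 : Int) + (i : Int))) := chunk_head (fun c => PySem.Str.isIn p c && pred c) s cols 0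
      rw [List.head?_append]
      cases h : cols.findIdx? (fun c => PySem.Str.isIn p c && pred c) with
      | none =>
          have hnil : ((PySem.List.enumerate cols).filterMap
              (fun ic => if PySem.Str.isIn p ic.2 && pred ic.2 then some (s, ic.1) else none)).head?
              = none := by rw [hch, h]; rfl
          simp only [aField, aInner_eq p pred cols columns hlen, h, Option.bind_none, hnil,
            Option.none_or]
          exact ih (s + 1)
      | some i =>
          have hi : i < cols.length := by
            have := List.findIdx?_eq_some_iff_findIdx_eq.mp h
            omega
          have hhead : ((PySem.List.enumerate cols).filterMap
              (fun ic => if PySem.Str.isIn p ic.2 && pred ic.2 then some (s, ic.1) else none)).head?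
              = some (s, (i : Int)) := by rw [hch, h]; simp
          simp only [aField, aInner_eq p pred cols columns hlen, h, hhead, Option.some_or,
            Option.bind_some]
          rw [PySem.List.pyGet?_natCast]
          have : i < columns.length := by omega
          simp [List.getElem?_eq_getElem this]

theorem bField_eq (columns cols : List String) (hlen : columns.length = cols.length)
    (patterns : List String) (pred : String → Bool) :
    bField columns cols patterns pred = aField columns cols pred patterns := by
  unfold bField bHits
  rw [min2_sorted _ (hits_shape cols pred patterns 0).1]
  rw [aField_eq_head columns cols hlen pred patterns 0]
  cases h : ((PySem.List.enumerate patterns 0).flatMap (fun rp =>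
      (PySem.List.enumerate cols).filterMap (fun ic =>
        if PySem.Str.isIn rp.2 ic.2 && pred ic.2 then some (rp.1, ic.1) else none))).head? <;>
    simp

-- ===== VERDICT (by name: the statement is the Claim_ definition above) =====
theorem suggest_column_mappings_spec : Claim_equal_suggest_column_mappings := by
  intro columns _
  unfold Spec_suggest_column_mappings
  have hlen : columns.length = (columns.map PySem.Str.lower).length := by simp
  simp only [suggest_column_mappings, suggest_column_mappings_alt, bFields, List.foldl,
    bField_eq columns (columns.map PySem.Str.lower) hlen]
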